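-- pv_equiv track=rewrite | github.com/marslite/DSA-review | Week_2/week2_free_answers.py | func_five
-- ===== SOURCE A (Python) =====
-- def func_five(nums) -> int:
--     #For nums = [1,1,1,1,1] it will output 32
--     #For nums = [1,2,3,4,5] it will output 98
--     #The function starts with a for loop that takes the size of list n
--     #Insise this for loop we can find a nested for loop that iterates for each time the size of the individual element of the list
--     #In case of nums[i] = 1 the for loop will iterate one time by having power_sum = 2
--     #This will increase the power_sum time 2 by each indiidual item of the list nums, so if it is [1,1,1,1] for every 1 the powe_sum *2 will be calculated.
--     # So this can be reaad as 2^5 = 32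
--     #Essentially this function multiplies two and add it up to power_sum times each number, so if for instance nums[i] = 5 then we will have 2*2*2*2*2 or 2^5
--     #While computing [1,2,3,4,5]  we get = 2^1 * 2^2 * 2^3 * 2^4 * 2^5 = 32767 then in the last for loop iteration we add 1 for each individual element of 32768.
--     #We enventually get total = 32767 and then finally we do modulo of it, 32767 % 99 = 98
--     # In essence this function raise 2 to the power of each element of the list and then adds up to power_up than then adds up to total than then is returned
--     #after calculating modulo 99
--     #Runtime = O(N * N * 2^n) The N * N is for the two  nested loops and 2^n is for power_sum that multiplies 2 to the n at each iteration
--     #Runtime continued = So when calculating the runtime we have O(N*N * 2^N) which translates to O(N^2 * 2^N), since 2^n is larger than n^2 the Runtime is equal to O(2^N)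
--     #Space complexity will be constnat because there would be a constant  amount of space that is for power_sums and total, so O(1)
--     power_sum = 1
--     for i in range(len(nums)):
--         for j in range(nums[i]):
--             power_sum *= 2
--
--     total = 0
--     for i in range(power_sum):
--         total += 1
--     return total % 99
-- ===== SOURCE B (Python) =====
-- def func_five(nums) -> int:
--     exp = 0
--     for x in nums:
--         if x > 0:
--             exp += x
--     return pow(2, exp, 99)
-- ===== Notes on version B (the rewrite author's own statement) =====
-- stated objective: faster
-- what changed: Replaces the exponential repeated-doubling plus unary counting loop (incrementing total 2^S times) with a single pass summing the positive elements and one modular exponentiation pow(2, S, 99); intended as faster: in a timing run A already timed out at n=16 where B returned instantly, so no ratio could be measured.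
import Mathlib
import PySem

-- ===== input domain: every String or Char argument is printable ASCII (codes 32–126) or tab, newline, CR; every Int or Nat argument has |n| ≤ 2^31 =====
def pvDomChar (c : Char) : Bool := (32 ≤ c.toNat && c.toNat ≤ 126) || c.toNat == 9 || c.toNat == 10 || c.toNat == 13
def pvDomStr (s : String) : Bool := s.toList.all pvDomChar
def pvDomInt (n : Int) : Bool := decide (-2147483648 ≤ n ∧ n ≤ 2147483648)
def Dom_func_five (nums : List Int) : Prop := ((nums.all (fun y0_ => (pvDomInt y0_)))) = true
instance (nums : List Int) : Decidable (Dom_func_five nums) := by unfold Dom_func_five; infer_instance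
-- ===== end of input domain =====

-- B replaces A's repeated-doubling and unary counting loops (2^S iterations) by a single pass
-- summing the positive elements and a binary modular exponentiation pow(2, S, 99).

-- ===== PORT A =====
def func_five (nums : List Int) : Int :=
  let power_sum : Int :=
    (PySem.List.pyRange 0 (nums.length : Int) 1).foldl
      (fun p i =>
        (PySem.List.pyRange 0 (PySem.List.pyGetD nums i 0) 1).foldl (fun q _ => q * 2) p)
      1
  let total : Int :=
    (PySem.List.pyRange 0 power_sum 1).foldl (fun t _ => t + 1) 0
  PySem.Int.mod total 99

-- ===== PORT B =====
-- port of Python's built-in pow(b, e, m) for nonnegative exponent and positive modulus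
-- (binary exponentiation, as CPython implements it)
def pvPowMod (b : Int) (e : Nat) (m : Int) : Int :=
  if e = 0 then PySem.Int.mod 1 m
  else if e % 2 = 0 then
    let h := pvPowMod b (e / 2) m
    PySem.Int.mod (h * h) m
  else
    PySem.Int.mod (b * pvPowMod b (e - 1) m) m
termination_by e
decreasing_by
  · exact Nat.div_lt_self (Nat.pos_of_ne_zero (by assumption)) (by norm_num)
  · exact Nat.sub_lt (Nat.pos_of_ne_zero (by assumption)) (by norm_num)

def func_five_alt (nums : List Int) : Int :=
  let e : Int := nums.foldl (fun s x => if x > 0 then s + x else s) 0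
  -- e is a sum of positive elements, hence nonnegative: toNat is exact here
  pvPowMod 2 e.toNat 99

-- ===== PRECONDITION & SPEC =====
def Spec_func_five (nums : List Int) (out : Int) : Prop := out = func_five_alt nums
instance (nums : List Int) (out : Int) : Decidable (Spec_func_five nums out) := by unfold Spec_func_five; infer_instance

-- ===== CLAIM (what is proved, stated in full; the proofs are below) =====
def Claim_equal_func_five : Prop := ∀ (nums : List Int), Dom_func_five nums → Spec_func_five nums (func_five nums)

-- ===== LEMMAS AND PROOFS =====

-- doubling loop multiplies by 2^(length)
lemma pv_foldl_double (l : List Int) (p : Int) :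
    l.foldl (fun q _ => q * 2) p = p * 2 ^ l.length := by
  induction l generalizing p with
  | nil => simp
  | cons a t ih => simp [List.foldl, ih, pow_succ]; ring

-- unary counting loop counts the length
lemma pv_foldl_count (l : List Int) (t : Int) :
    l.foldl (fun t _ => t + 1) t = t + l.length := by
  induction l generalizing t with
  | nil => simp
  | cons a s ih => simp [List.foldl, ih]; ring

-- A's outer loop computes p * 2^(sum of toNat's)
lemma pv_afold (l : List Int) (p : Int) :
    l.foldl (fun p x => p * 2 ^ x.toNat) p = p * 2 ^ (l.map Int.toNat).sum := by
  induction l generalizing p with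
  | nil => simp
  | cons a t ih => simp [List.foldl, ih, pow_add]; ring

-- B's sum of positive elements equals the sum of toNat's
lemma pv_bfold (l : List Int) (s : Int) :
    l.foldl (fun s x => if x > 0 then s + x else s) s = s + ((l.map Int.toNat).sum : Nat) := by
  induction l generalizing s with
  | nil => simp
  | cons a t ih =>
    simp only [List.foldl, List.map, List.sum_cons]
    by_cases h : a > 0 <;> simp [h, ih] <;> omega

lemma pv_powMod_eq (b m : Int) (hm : 0 < m) : ∀ e : Nat, pvPowMod b e m = PySem.Int.mod (b ^ e) m := by
  intro e
  induction e using Nat.strong_induction_on with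
  | _ e ih =>
    rw [pvPowMod]
    by_cases h0 : e = 0
    · simp [h0]
    · simp only [h0, if_false]
      by_cases h2 : e % 2 = 0
      · have hlt : e / 2 < e := Nat.div_lt_self (Nat.pos_of_ne_zero h0) (by norm_num)
        simp only [h2, if_true, ih _ hlt, PySem.Int.mod_eq_emod_of_pos hm]
        conv_rhs => rw [show e = e / 2 + e / 2 by omega, pow_add]
        rw [← Int.mul_emod]
      · have hlt : e - 1 < e := Nat.sub_lt (Nat.pos_of_ne_zero h0) (by norm_num)
        simp only [h2, if_false, ih _ hlt, PySem.Int.mod_eq_emod_of_pos hm]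
        conv_rhs => rw [show e = 1 + (e - 1) by omega, pow_add, pow_one]
        rw [Int.mul_emod, Int.emod_emod_of_dvd _ (dvd_refl m), ← Int.mul_emod]

-- ===== VERDICT (by name: the statement is the Claim_ definition above) =====
theorem func_five_spec : Claim_equal_func_five := by
  intro nums _
  unfold Spec_func_five func_five func_five_alt
  simp only []
  rw [PySem.List.foldl_pyRange_zero_pyGetD' nums 0
        (fun p x => (PySem.List.pyRange 0 x 1).foldl (fun q _ => q * 2) p) 1]
  simp only [pv_foldl_double, PySem.List.length_pyRange_one]
  simp only [sub_zero]
  rw [pv_afold, pv_foldl_count, PySem.List.length_pyRange_one, pv_bfold,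
      pv_powMod_eq 2 99 (by norm_num)]
  have h3 : ((List.map (Nat.cast ∘ Int.toNat) nums).sum : Int).toNat = (List.map Int.toNat nums).sum := by
    rw [← List.map_map, ← Nat.cast_list_sum, Int.toNat_natCast]
  simp [h3]
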